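-- pv_equiv track=rewrite | github.com/akashzeen-art/astrology | backend/numerology/utils.py | reduce_number
-- ===== SOURCE A (Python) =====
-- MASTER_NUMBERS = {11, 22, 33}
--
-- def reduce_number(n: int) -> int:
--   """
--   Reduce a number using Pythagorean digit reduction,
--   preserving master numbers (11, 22, 33).
--   """
--   if n in MASTER_NUMBERS:
--     return n
--   while n > 9:
--     digits = [int(d) for d in str(n)]
--     n = sum(digits)
--     if n in MASTER_NUMBERS:
--       break
--   return n
-- ===== SOURCE B (Python) =====
-- MASTER_NUMBERS = {11, 22, 33}
--
-- def reduce_number(n: int) -> int: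
--     """Recursive digit-sum reduction preserving master numbers 11/22/33,
--     computing the digit sum arithmetically instead of via str()."""
--     if n in (11, 22, 33) or n <= 9:
--         return n
--     s, m = 0, n
--     while m:
--         s += m % 10
--         m //= 10
--     if s in (11, 22, 33):
--         return s
--     return reduce_number(s)
-- ===== Notes on version B (the rewrite author's own statement) =====
-- stated objective: alternative
-- what changed: Replaces the iterative while-loop over str(n)-derived digit lists with a recursion over the digit-sum recurrence whose digit sum is computed arithmetically by repeated n%10 / n//=10 instead of string conversion.
import Mathlib
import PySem

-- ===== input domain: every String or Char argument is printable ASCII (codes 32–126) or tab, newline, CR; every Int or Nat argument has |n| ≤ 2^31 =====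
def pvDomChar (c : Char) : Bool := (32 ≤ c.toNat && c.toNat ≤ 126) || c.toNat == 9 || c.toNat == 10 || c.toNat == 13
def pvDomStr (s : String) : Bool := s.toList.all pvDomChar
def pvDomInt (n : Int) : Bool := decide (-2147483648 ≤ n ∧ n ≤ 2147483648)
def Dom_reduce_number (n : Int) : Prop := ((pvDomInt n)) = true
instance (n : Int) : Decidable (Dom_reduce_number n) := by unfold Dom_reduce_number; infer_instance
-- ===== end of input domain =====

-- B changes the decomposition: recursion over the digit-sum recurrence with an arithmetic
-- (%10, //10) digit sum, instead of A's while loop summing the digits of str(n).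

-- ===== PORT A =====
-- int(d) for a single character d; inside A's loop d is always a digit of str(n) with n > 9,
-- so ofChars? is always `some` there and the 0 default is unreachable.
def pvCharInt (c : Char) : Int := (PySem.Int.ofChars? [c]).getD 0

-- A's `while n > 9` loop; fuel n.toNat + 1 suffices since the digit sum strictly decreases n > 9.
def pvLoopA : Nat → Int → Int
  | 0, n => n
  | fuel + 1, n =>
    if n > 9 then
      let n' := ((PySem.Int.toChars n).map pvCharInt).sum   -- n = sum(int(d) for d in str(n))
      if n' = 11 ∨ n' = 22 ∨ n' = 33 then n'                -- break
      else pvLoopA fuel n'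
    else n

def reduce_number (n : Int) : Int :=
  if n = 11 ∨ n = 22 ∨ n = 33 then n
  else pvLoopA (n.toNat + 1) n

-- ===== PORT B =====
-- B's inner `while m: s += m % 10; m //= 10` loop; it runs on m = n > 9, so it is exactly
-- Nat %/÷ arithmetic (Python // and % agree with Nat division on nonnegative operands).
def pvDigitSum (m : Nat) : Nat :=
  if m = 0 then 0 else m % 10 + pvDigitSum (m / 10)
decreasing_by exact Nat.div_lt_self (Nat.pos_of_ne_zero (by assumption)) (by norm_num)

theorem pvDigitSum_lt (m : Nat) (h : 10 ≤ m) : pvDigitSum m < m := by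
  rw [pvDigitSum]
  have h10 : pvDigitSum (m / 10) ≤ m / 10 := by
    have : ∀ k, ∀ j ≤ k, pvDigitSum j ≤ j := by
      intro k
      induction k with
      | zero => intro j hj; interval_cases j; rw [pvDigitSum]; simp
      | succ k ih =>
        intro j hj
        rw [pvDigitSum]
        split
        · omega
        · have hd : j / 10 ≤ k := by omega
          have := ih (j / 10) hd
          omega
    exact this (m / 10) (m / 10) le_rfl
  have := Nat.mod_add_div m 10
  split <;> omega

def reduce_number_alt (n : Int) : Int :=
  if n = 11 ∨ n = 22 ∨ n = 33 ∨ n ≤ 9 then n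
  else
    let s : Int := (pvDigitSum n.toNat : Int)
    if s = 11 ∨ s = 22 ∨ s = 33 then s
    else reduce_number_alt s
termination_by n.toNat
decreasing_by
  have h10 : 10 ≤ n.toNat := by omega
  have := pvDigitSum_lt n.toNat h10
  simp only [Int.toNat_natCast]
  omega

-- ===== PRECONDITION & SPEC =====
def Spec_reduce_number (n : Int) (out : Int) : Prop := out = reduce_number_alt n
instance (n : Int) (out : Int) : Decidable (Spec_reduce_number n out) := by unfold Spec_reduce_number; infer_instance

-- ===== CLAIM (what is proved, stated in full; the proofs are below) =====
def Claim_equal_reduce_number : Prop := ∀ (n : Int), Dom_reduce_number n → Spec_reduce_number n (reduce_number n)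

-- ===== LEMMAS AND PROOFS =====

theorem pvCharInt_digitChar (r : Nat) (h : r < 10) : pvCharInt (Nat.digitChar r) = (r : Int) := by
  interval_cases r <;> rfl

theorem pvToDigitsCore_sum (f : Nat) :
    ∀ (m : Nat) (l : List Char), m < 10 ^ f →
      ((Nat.toDigitsCore 10 f m l).map pvCharInt).sum
        = (pvDigitSum m : Int) + (l.map pvCharInt).sum := by
  induction f with
  | zero =>
    intro m l hm
    have : m = 0 := by simpa using hm
    subst this
    rw [pvDigitSum]
    simp [Nat.toDigitsCore]
  | succ f ih =>
    intro m l hm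
    rw [Nat.toDigitsCore]
    have hmod : m % 10 < 10 := Nat.mod_lt _ (by norm_num)
    by_cases hdiv : m / 10 = 0
    · rw [if_pos hdiv]
      simp only [List.map_cons, List.sum_cons]
      rw [pvCharInt_digitChar _ hmod]
      have hds : pvDigitSum m = m % 10 := by
        rw [pvDigitSum]
        split_ifs with h0
        · omega
        · rw [hdiv, pvDigitSum]
          simp
      rw [hds]
    · rw [if_neg hdiv]
      have hlt : m / 10 < 10 ^ f := by
        rw [pow_succ] at hm
        omega
      rw [ih (m / 10) (Nat.digitChar (m % 10) :: l) hlt]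
      simp only [List.map_cons, List.sum_cons]
      rw [pvCharInt_digitChar _ hmod]
      conv_rhs => rw [pvDigitSum]
      rw [if_neg (by omega)]
      push_cast
      ring

theorem pvStrSum (n : Int) (h : 9 < n) :
    ((PySem.Int.toChars n).map pvCharInt).sum = (pvDigitSum n.toNat : Int) := by
  have hneg : ¬ n < 0 := by omega
  simp only [PySem.Int.toChars, if_neg hneg]
  have hfuel : n.toNat < 10 ^ (n.toNat + 1) := by
    calc n.toNat < 10 ^ n.toNat := Nat.lt_pow_self (by norm_num)
    _ ≤ 10 ^ (n.toNat + 1) := Nat.pow_le_pow_right (by norm_num) (by omega)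
  have := pvToDigitsCore_sum (n.toNat + 1) n.toNat [] hfuel
  simpa [Nat.toDigits] using this

theorem pvLoopA_eq_alt (fuel : Nat) :
    ∀ (n : Int), ¬ (n = 11 ∨ n = 22 ∨ n = 33) → n.toNat < fuel →
      pvLoopA fuel n = reduce_number_alt n := by
  induction fuel with
  | zero => intro n _ h; omega
  | succ fuel ih =>
    intro n hm hf
    rw [pvLoopA]
    by_cases h9 : n > 9
    · have hnm : ¬ (n = 11 ∨ n = 22 ∨ n = 33 ∨ n ≤ 9) := by
        push_neg at hm ⊢
        omega
      rw [if_pos h9]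
      simp only [pvStrSum n h9]
      rw [reduce_number_alt, if_neg hnm]
      by_cases hms : (pvDigitSum n.toNat : Int) = 11 ∨ (pvDigitSum n.toNat : Int) = 22 ∨ (pvDigitSum n.toNat : Int) = 33
      · simp only [if_pos hms]
      · simp only [if_neg hms]
        apply ih _ hms
        have h10 : 10 ≤ n.toNat := by omega
        have := pvDigitSum_lt n.toNat h10
        omega
    · rw [if_neg h9, reduce_number_alt, if_pos (by omega)]

-- ===== VERDICT (by name: the statement is the Claim_ definition above) =====
theorem reduce_number_spec : Claim_equal_reduce_number := by
  intro n _
  unfold Spec_reduce_number reduce_number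
  by_cases hm : n = 11 ∨ n = 22 ∨ n = 33
  · rw [if_pos hm, reduce_number_alt, if_pos (by tauto)]
  · rw [if_neg hm]
    exact pvLoopA_eq_alt (n.toNat + 1) n hm (by omega)
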